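-- pv_equiv track=rewrite | github.com/ageecaci/advent-of-code-2023 | 7/7b.py | count_ranks
-- ===== SOURCE A (Python) =====
-- def count_ranks(hand: list[int]) -> dict[int, int]:
--     counts = {}
--     for card in hand:
--         if card not in counts:
--             counts[card] = 1
--         else:
--             counts[card] += 1
--     return counts
-- ===== SOURCE B (Python) =====
-- def count_ranks(hand: list[int]) -> dict[int, int]:
--     return {card: hand.count(card) for card in dict.fromkeys(hand)}
-- ===== Notes on version B (the rewrite author's own statement) =====
-- stated objective: idiomatic
-- what changed: Replaces the incremental dict-accumulation loop with a dedup-then-count comprehension: the distinct cards (first occurrences, via dict.fromkeys) are each mapped to hand.count(card).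
import Mathlib
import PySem

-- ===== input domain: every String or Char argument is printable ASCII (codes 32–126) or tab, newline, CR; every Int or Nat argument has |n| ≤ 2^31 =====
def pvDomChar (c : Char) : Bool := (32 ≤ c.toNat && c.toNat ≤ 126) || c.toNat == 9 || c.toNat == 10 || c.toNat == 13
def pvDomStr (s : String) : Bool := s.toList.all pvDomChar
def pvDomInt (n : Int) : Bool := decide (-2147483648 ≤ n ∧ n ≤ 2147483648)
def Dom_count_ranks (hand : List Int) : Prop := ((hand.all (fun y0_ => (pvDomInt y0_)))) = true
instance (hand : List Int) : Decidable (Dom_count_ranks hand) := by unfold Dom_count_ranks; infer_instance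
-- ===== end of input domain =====

-- B: dedup-then-count comprehension instead of A's incremental dict-accumulation loop (idiomatic; same return value).
-- ===== PORT A =====
def count_ranks (hand : List Int) : List (Int × Int) :=
  (hand.foldl (fun (counts : PySem.Dict Int Int) card =>
      if counts.contains card = false then counts.insert card 1
      else counts.insert card (counts.getD card 0 + 1)) PySem.Dict.empty).items

-- ===== PORT B =====
def count_ranks_alt (hand : List Int) : List (Int × Int) :=
  (PySem.List.dedup hand).map (fun card => (card, (PySem.List.count hand card : Int)))

-- ===== PRECONDITION & SPEC =====
def Spec_count_ranks (hand : List Int) (out : List (Int × Int)) : Prop := out = count_ranks_alt hand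
instance (hand : List Int) (out : List (Int × Int)) : Decidable (Spec_count_ranks hand out) := by unfold Spec_count_ranks; infer_instance

-- ===== CLAIM (what is proved, stated in full; the proofs are below) =====
def Claim_equal_count_ranks : Prop := ∀ (hand : List Int), Dom_count_ranks hand → Spec_count_ranks hand (count_ranks hand)

-- ===== LEMMAS AND PROOFS =====

-- A's loop step is extensionally the Counter step: on a fresh key getD is 0, so both branches insert getD+1.
lemma count_ranks_step_eq :
    (fun (counts : PySem.Dict Int Int) (card : Int) =>
      if counts.contains card = false then counts.insert card 1
      else counts.insert card (counts.getD card 0 + 1))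
    = (fun (d : PySem.Dict Int Int) (x : Int) => d.insert x (d.getD x 0 + 1)) := by
  funext d x
  by_cases h : d.contains x = false
  · rw [if_pos h, PySem.Dict.getD_of_not_contains d (0 : Int) h]; norm_num
  · rw [if_neg h]

-- ===== VERDICT (by name: the statement is the Claim_ definition above) =====
theorem count_ranks_spec : Claim_equal_count_ranks := by
  intro hand _
  unfold Spec_count_ranks count_ranks count_ranks_alt
  rw [count_ranks_step_eq, PySem.Dict.foldl_insert_getD_add_one_eq_counter,
      PySem.Dict.items_counter]
  simp
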